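-- pv_equiv track=rewrite | github.com/LQK164/Thesis-Phishing-Detection | feature_extraction.py | char_repeat
-- ===== SOURCE A (Python) =====
-- def char_repeat(words_raw: list[str]):
--     def __all_same(items: str):
--         return all(x == items[0] for x in items)
--
--     repeat = {"2": 0, "3": 0, "4": 0, "5": 0}
--     part = [2, 3, 4, 5]
--
--     for word in words_raw:
--         for char_repeat_count in part:
--             for i in range(len(word) - char_repeat_count + 1):
--                 sub_word = word[i : i + char_repeat_count]
--                 if __all_same(sub_word):
--                     repeat[str(char_repeat_count)] = repeat[str(char_repeat_count)] + 1
--     return sum(list(repeat.values()))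
-- ===== SOURCE B (Python) =====
-- def char_repeat(words_raw: list[str]):
--     # One pass per word: track the length L of the current run of equal characters; when a
--     # run ends, add sum(L - k + 1 for k in range(2, min(L, 5) + 1)) via its closed form
--     # (m - 1) * (2 * L - m) // 2 with m = min(L, 5).  No slicing, no dict.
--     total = 0
--     for word in words_raw:
--         prev = None
--         L = 0
--         for ch in word:
--             if ch == prev:
--                 L += 1
--             else:
--                 if L > 1:
--                     m = L if L < 5 else 5
--                     total += (m - 1) * (2 * L - m) // 2
--                 prev = ch
--                 L = 1
--         if L > 1:
--             m = L if L < 5 else 5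
--             total += (m - 1) * (2 * L - m) // 2
--     return total
-- ===== Notes on version B (the rewrite author's own statement) =====
-- stated objective: faster
-- what changed: A slides a window of each length 2..5 over every word, slicing out each substring and testing all-equal, tallying into a dict; B makes a single pass per word tracking the current equal-character run length and adds sum over k in 2..5 of max(0, L-k+1) per run, with no slicing and no dict.
import Mathlib
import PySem

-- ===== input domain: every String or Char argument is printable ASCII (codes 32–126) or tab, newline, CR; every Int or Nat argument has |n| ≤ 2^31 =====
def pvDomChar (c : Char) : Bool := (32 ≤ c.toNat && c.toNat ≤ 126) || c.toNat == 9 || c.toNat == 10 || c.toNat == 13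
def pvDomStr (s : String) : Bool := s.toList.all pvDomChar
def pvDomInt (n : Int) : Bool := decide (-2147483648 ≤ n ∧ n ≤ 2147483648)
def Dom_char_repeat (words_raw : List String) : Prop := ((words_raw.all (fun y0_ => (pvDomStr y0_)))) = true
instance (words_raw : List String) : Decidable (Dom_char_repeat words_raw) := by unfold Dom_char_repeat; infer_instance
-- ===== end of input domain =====

-- B replaces A's per-word scan of all length-2..5 windows (with string slicing and a dict of
-- counters) by a single pass per word tracking the current run of equal characters; same result.


-- ===== PORT A =====
-- __all_same(items): all(x == items[0] for x in items); items[0] is only evaluated when some x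
-- exists, where cs[0]? = some of the first char, so the Option comparison is exact.
def pvAllSame (cs : List Char) : Bool := cs.all (fun x => cs[0]? == some x)

-- repeat[str(k)]: the keys "2".."5" are always present (k ∈ part), so getD 0 is the exact lookup.
def char_repeat (words_raw : List String) : Int :=
  let repeat0 : PySem.Dict String Int := PySem.Dict.ofList [("2", 0), ("3", 0), ("4", 0), ("5", 0)]
  let part : List Int := [2, 3, 4, 5]
  let final := words_raw.foldl (fun d word =>
    part.foldl (fun d k =>
      (PySem.List.pyRange 0 (PySem.Str.len word - k + 1) 1).foldl (fun d i =>
        let sub := PySem.List.slice word.toList (some i) (some (i + k))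
        if pvAllSame sub then
          d.insert (PySem.Int.toStr k) (d.getD (PySem.Int.toStr k) 0 + 1)
        else d) d) d) repeat0
  final.values.sum

-- ===== PORT B =====
-- 'if L > 1: m = L if L < 5 else 5; total += (m - 1) * (2 * L - m) // 2'
def pvRunAdd (total L : Int) : Int :=
  if L > 1 then
    let m := if L < 5 then L else 5
    total + PySem.Int.floordiv ((m - 1) * (2 * L - m)) 2
  else total

def pvScanStep (s : Option Char × Int × Int) (ch : Char) : Option Char × Int × Int :=
  if some ch == s.1 then (s.1, s.2.1 + 1, s.2.2)
  else (some ch, 1, pvRunAdd s.2.2 s.2.1)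

def pvWordB (cs : List Char) : Int :=
  let s := cs.foldl pvScanStep (none, 0, 0)
  pvRunAdd s.2.2 s.2.1

def char_repeat_alt (words_raw : List String) : Int :=
  words_raw.foldl (fun total word => total + pvWordB word.toList) 0

-- ===== PRECONDITION & SPEC =====
def Spec_char_repeat (words_raw : List String) (out : Int) : Prop := out = char_repeat_alt words_raw
instance (words_raw : List String) (out : Int) : Decidable (Spec_char_repeat words_raw out) := by unfold Spec_char_repeat; infer_instance

-- ===== CLAIM (what is proved, stated in full; the proofs are below) =====
def Claim_equal_char_repeat : Prop := ∀ (words_raw : List String), Dom_char_repeat words_raw → Spec_char_repeat words_raw (char_repeat words_raw)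

-- ===== LEMMAS AND PROOFS =====

-- sum over k = 2..5 of max(0, L - k + 1): the contribution of one run of length L
def pvContrib (L : Int) : Int := (([2, 3, 4, 5] : List Int).map (fun k => max 0 (L - k + 1))).sum

-- number of all-equal windows of length k in cs (A's count for one k, on the Nat side)
def pvW (k : Nat) (cs : List Char) : Nat :=
  (List.range (cs.length + 1 - k)).countP (fun j => pvAllSame ((cs.drop j).take k))

-- run-length encoding of a word
def pvRuns (cs : List Char) : List (Char × Nat) :=
  match cs with
  | [] => []
  | c :: t => (c, (t.takeWhile (· == c)).length + 1) :: pvRuns (t.dropWhile (· == c))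
  termination_by cs.length
  decreasing_by simpa using Nat.lt_succ_of_le (List.length_dropWhile_le (· == c) t)

-- A's per-word Int count, summed over k = 2,3,4,5
def pvWordA (cs : List Char) : Int :=
  (pvW 2 cs : Int) + (pvW 3 cs : Int) + (pvW 4 cs : Int) + (pvW 5 cs : Int)

-- ---- Dict bookkeeping on the literal four-key state ----

theorem pvIns2 (a b c d v : Int) :
    (PySem.Dict.mk [("2",a),("3",b),("4",c),("5",d)]).insert "2" v
      = PySem.Dict.mk [("2",v),("3",b),("4",c),("5",d)] := by
  simp [PySem.Dict.insert, PySem.Dict.contains]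

theorem pvIns3 (a b c d v : Int) :
    (PySem.Dict.mk [("2",a),("3",b),("4",c),("5",d)]).insert "3" v
      = PySem.Dict.mk [("2",a),("3",v),("4",c),("5",d)] := by
  simp [PySem.Dict.insert, PySem.Dict.contains]

theorem pvIns4 (a b c d v : Int) :
    (PySem.Dict.mk [("2",a),("3",b),("4",c),("5",d)]).insert "4" v
      = PySem.Dict.mk [("2",a),("3",b),("4",v),("5",d)] := by
  simp [PySem.Dict.insert, PySem.Dict.contains]

theorem pvIns5 (a b c d v : Int) :
    (PySem.Dict.mk [("2",a),("3",b),("4",c),("5",d)]).insert "5" v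
      = PySem.Dict.mk [("2",a),("3",b),("4",c),("5",v)] := by
  simp [PySem.Dict.insert, PySem.Dict.contains]

theorem pvGetD2 (a b c d : Int) :
    (PySem.Dict.mk [("2",a),("3",b),("4",c),("5",d)]).getD "2" 0 = a := by
  simp [PySem.Dict.getD_eq_get?_getD, PySem.Dict.get?_mk_cons]

theorem pvGetD3 (a b c d : Int) :
    (PySem.Dict.mk [("2",a),("3",b),("4",c),("5",d)]).getD "3" 0 = b := by
  simp [PySem.Dict.getD_eq_get?_getD, PySem.Dict.get?_mk_cons]

theorem pvGetD4 (a b c d : Int) :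
    (PySem.Dict.mk [("2",a),("3",b),("4",c),("5",d)]).getD "4" 0 = c := by
  simp [PySem.Dict.getD_eq_get?_getD, PySem.Dict.get?_mk_cons]

theorem pvGetD5 (a b c d : Int) :
    (PySem.Dict.mk [("2",a),("3",b),("4",c),("5",d)]).getD "5" 0 = d := by
  simp [PySem.Dict.getD_eq_get?_getD, PySem.Dict.get?_mk_cons]

theorem pvInner2 (l : List Int) (g : Int → Bool) (a b c d : Int) :
    l.foldl (fun dd i => if g i then dd.insert "2" (dd.getD "2" 0 + 1) else dd)
      (PySem.Dict.mk [("2",a),("3",b),("4",c),("5",d)])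
    = PySem.Dict.mk [("2", a + (l.countP g : Int)),("3",b),("4",c),("5",d)] := by
  induction l generalizing a with
  | nil => simp
  | cons x t ih =>
    simp only [List.foldl_cons, List.countP_cons]
    by_cases h : g x
    · rw [if_pos h, pvGetD2, pvIns2, ih]
      simp only [h, if_true, PySem.Dict.mk.injEq, List.cons.injEq, Prod.mk.injEq, true_and,
        and_true]
      omega
    · rw [if_neg h, ih]
      simp [h]

theorem pvInner3 (l : List Int) (g : Int → Bool) (a b c d : Int) :
    l.foldl (fun dd i => if g i then dd.insert "3" (dd.getD "3" 0 + 1) else dd)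
      (PySem.Dict.mk [("2",a),("3",b),("4",c),("5",d)])
    = PySem.Dict.mk [("2",a),("3", b + (l.countP g : Int)),("4",c),("5",d)] := by
  induction l generalizing b with
  | nil => simp
  | cons x t ih =>
    simp only [List.foldl_cons, List.countP_cons]
    by_cases h : g x
    · rw [if_pos h, pvGetD3, pvIns3, ih]
      simp only [h, if_true, PySem.Dict.mk.injEq, List.cons.injEq, Prod.mk.injEq, true_and,
        and_true]
      omega
    · rw [if_neg h, ih]
      simp [h]

theorem pvInner4 (l : List Int) (g : Int → Bool) (a b c d : Int) :
    l.foldl (fun dd i => if g i then dd.insert "4" (dd.getD "4" 0 + 1) else dd)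
      (PySem.Dict.mk [("2",a),("3",b),("4",c),("5",d)])
    = PySem.Dict.mk [("2",a),("3",b),("4", c + (l.countP g : Int)),("5",d)] := by
  induction l generalizing c with
  | nil => simp
  | cons x t ih =>
    simp only [List.foldl_cons, List.countP_cons]
    by_cases h : g x
    · rw [if_pos h, pvGetD4, pvIns4, ih]
      simp only [h, if_true, PySem.Dict.mk.injEq, List.cons.injEq, Prod.mk.injEq, true_and,
        and_true]
      omega
    · rw [if_neg h, ih]
      simp [h]

theorem pvInner5 (l : List Int) (g : Int → Bool) (a b c d : Int) :
    l.foldl (fun dd i => if g i then dd.insert "5" (dd.getD "5" 0 + 1) else dd)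
      (PySem.Dict.mk [("2",a),("3",b),("4",c),("5",d)])
    = PySem.Dict.mk [("2",a),("3",b),("4",c),("5", d + (l.countP g : Int))] := by
  induction l generalizing d with
  | nil => simp
  | cons x t ih =>
    simp only [List.foldl_cons, List.countP_cons]
    by_cases h : g x
    · rw [if_pos h, pvGetD5, pvIns5, ih]
      simp only [h, if_true, PySem.Dict.mk.injEq, List.cons.injEq, Prod.mk.injEq, true_and,
        and_true]
      omega
    · rw [if_neg h, ih]
      simp [h]

theorem pvCount_eq (cs : List Char) (k : Nat) :
    (PySem.List.pyRange 0 ((cs.length : Int) - (k : Int) + 1) 1).countP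
      (fun i => pvAllSame (PySem.List.slice cs (some i) (some (i + (k : Int)))))
    = pvW k cs := by
  rw [PySem.List.pyRange_one, List.countP_map]
  have h1 : (((cs.length : Int) - (k : Int) + 1) - 0).toNat = cs.length + 1 - k := by omega
  rw [h1, pvW]
  apply List.countP_congr
  intro j _
  simp [Function.comp, PySem.List.slice_natCast_add]


theorem pvAllSame_replicate (k : Nat) (c : Char) : pvAllSame (List.replicate k c) = true := by
  cases k with
  | zero => rfl
  | succ m => simp [pvAllSame]

theorem pvAllSame_false (m : Nat) (c e : Char) (h : e ≠ c) (rest : List Char) :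
    pvAllSame (List.replicate (m+1) c ++ e :: rest) = false := by
  have h0 : (List.replicate (m+1) c ++ e :: rest)[0]? = some c := by
    rw [List.getElem?_append_left (by simp)]
    simp
  simp only [pvAllSame, h0]
  rw [List.all_eq_false]
  exact ⟨e, List.mem_append_right _ (List.mem_cons_self), by simp [Ne.symm h]⟩

theorem pvW_zero_of_lt (k : Nat) (cs : List Char) (h : cs.length < k) : pvW k cs = 0 := by
  have : cs.length + 1 - k = 0 := by omega
  simp [pvW, this]

theorem pvW_cons (k : Nat) (c : Char) (u : List Char) (h : k ≤ u.length + 1) :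
    pvW k (c :: u) = (if pvAllSame ((c :: u).take k) then 1 else 0) + pvW k u := by
  have hl : (c :: u).length + 1 - k = (u.length + 1 - k) + 1 := by simp; omega
  rw [pvW, hl, List.range_succ_eq_map, List.countP_cons, List.countP_map]
  simp only [List.drop_zero]
  rw [pvW]
  have : List.countP ((fun j => pvAllSame ((c :: u).drop j |>.take k)) ∘ Nat.succ)
      (List.range (u.length + 1 - k))
      = List.countP (fun j => pvAllSame ((u.drop j).take k)) (List.range (u.length + 1 - k)) := by
    apply List.countP_congr
    intro j _
    simp [Function.comp]
  rw [this]
  exact Nat.add_comm _ _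

theorem pvW_repl (k : Nat) (hk : 2 ≤ k) (c : Char) (m : Nat) (rest : List Char)
    (hrest : ∀ e, rest.head? = some e → e ≠ c) :
    pvW k (List.replicate m c ++ rest) = (m + 1 - k) + pvW k rest := by
  induction m with
  | zero =>
    have : 1 - k = 0 := by omega
    simp [this]
  | succ m ih =>
    rw [List.replicate_succ, List.cons_append]
    by_cases hlen : k ≤ (List.replicate m c ++ rest).length + 1
    · rw [pvW_cons k c _ hlen, ih]
      by_cases hk2 : k ≤ m + 1
      · have htake : (c :: (List.replicate m c ++ rest)).take k = List.replicate k c := by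
          rw [← List.cons_append, ← List.replicate_succ,
            List.take_append_of_le_length (by simp; omega), List.take_replicate]
          congr 1
          omega
        rw [htake, pvAllSame_replicate, if_pos rfl]
        omega
      · -- k > m + 1 : the window reaches into rest, whose head differs from c
        have hrl : rest.length ≥ 1 := by
          simp at hlen
          omega
        obtain ⟨e, rest', rfl⟩ : ∃ e rest', rest = e :: rest' := by
          cases rest with
          | nil => simp at hrl
          | cons e r => exact ⟨e, r, rfl⟩
        have he : e ≠ c := hrest e rfl
        have htake : (c :: (List.replicate m c ++ e :: rest')).take k
            = List.replicate (m+1) c ++ (e :: rest').take (k - (m+1)) := by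
          rw [← List.cons_append, ← List.replicate_succ, List.take_append, List.take_replicate]
          congr 2
          · omega
          · simp
        have hk3 : k - (m+1) = (k - m - 2) + 1 := by omega
        rw [htake, hk3, List.take_succ_cons, pvAllSame_false _ _ _ he, if_neg (by simp)]
        omega
    · have h1 : pvW k (c :: (List.replicate m c ++ rest)) = 0 := by
        apply pvW_zero_of_lt
        simp at hlen ⊢
        omega
      have h2 : pvW k rest = 0 := by
        apply pvW_zero_of_lt
        simp at hlen
        omega
      rw [h1, h2]
      simp at hlen
      omega

theorem pvTakeWhile_replicate (c : Char) (t : List Char) :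
    t.takeWhile (· == c) = List.replicate (t.takeWhile (· == c)).length c := by
  rw [List.eq_replicate_iff]
  exact ⟨rfl, fun x hx => by simpa using List.mem_takeWhile_imp hx⟩

theorem pvHead_dropWhile (c : Char) (t : List Char) :
    ∀ e, (t.dropWhile (· == c)).head? = some e → e ≠ c := by
  intro e he
  have h := List.head?_dropWhile_not (· == c) t
  rw [he] at h
  simpa using h

theorem pvW_runs (k : Nat) (hk : 2 ≤ k) (cs : List Char) :
    pvW k cs = ((pvRuns cs).map (fun p => p.2 + 1 - k)).sum := by
  induction cs using pvRuns.induct with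
  | case1 =>
    have h0 : 1 - k = 0 := by omega
    simp [pvW, pvRuns, h0]
  | case2 c t ih =>
    have hsplit : c :: t = List.replicate ((t.takeWhile (· == c)).length + 1) c
        ++ t.dropWhile (· == c) := by
      conv_lhs => rw [← List.takeWhile_append_dropWhile (p := (· == c)) (l := t)]
      rw [List.replicate_succ, List.cons_append]
      congr 1
      conv_lhs => rw [pvTakeWhile_replicate c t]
    have hW : pvW k (c :: t)
        = ((t.takeWhile (· == c)).length + 1 + 1 - k) + pvW k (t.dropWhile (· == c)) := by
      conv_lhs => rw [hsplit]
      exact pvW_repl k hk c _ _ (pvHead_dropWhile c t)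
    have hR : pvRuns (c :: t) = (c, (t.takeWhile (· == c)).length + 1)
        :: pvRuns (t.dropWhile (· == c)) := by rw [pvRuns.eq_def]
    rw [hW, ih, hR]
    simp

theorem pvRunAdd_eq (t L : Int) : pvRunAdd t L = t + pvContrib L := by
  simp only [pvRunAdd, pvContrib, List.map_cons, List.map_nil, List.sum_cons, List.sum_nil]
  rw [PySem.Int.floordiv_eq_ediv_of_pos (by norm_num)]
  split_ifs with h1 h2
  · interval_cases L <;> omega
  · omega
  · omega

theorem pvScan_run (m : Nat) (c : Char) (u : List Char) (j t : Int) :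
    (List.replicate m c ++ u).foldl pvScanStep (some c, j, t)
      = u.foldl pvScanStep (some c, j + m, t) := by
  induction m generalizing j with
  | zero => simp
  | succ m ih =>
    rw [List.replicate_succ, List.cons_append, List.foldl_cons]
    have hstep : pvScanStep (some c, j, t) c = (some c, j + 1, t) := by
      simp [pvScanStep]
    rw [hstep, ih]
    congr 1
    push_cast
    ring_nf

theorem pvScan_finish : ∀ (n : Nat) (cs : List Char), cs.length ≤ n →
    ∀ (c : Char) (j t : Int), (∀ e, cs.head? = some e → e ≠ c) →
    ((cs.foldl pvScanStep (some c, j, t)).2.2 + pvContrib (cs.foldl pvScanStep (some c, j, t)).2.1)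
      = t + pvContrib j + ((pvRuns cs).map (fun p => pvContrib (p.2 : Int))).sum := by
  intro n
  induction n with
  | zero =>
    intro cs hcs c j t _
    have : cs = [] := List.eq_nil_of_length_eq_zero (by omega)
    subst this
    simp [pvRuns]
  | succ n ih =>
    intro cs hcs c j t hhead
    cases cs with
    | nil =>
      simp [pvRuns]
    | cons d t' =>
      have hd : d ≠ c := hhead d rfl
      rw [List.foldl_cons]
      have hstep : pvScanStep (some c, j, t) d = (some d, 1, t + pvContrib j) := by
        have hne : (some d == some c) = false := by simp [hd]
        simp [pvScanStep, hne, pvRunAdd_eq]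
      rw [hstep]
      have hsplit : t' = List.replicate (t'.takeWhile (· == d)).length d
          ++ t'.dropWhile (· == d) := by
        conv_lhs => rw [← List.takeWhile_append_dropWhile (p := (· == d)) (l := t')]
        congr 1
        conv_lhs => rw [pvTakeWhile_replicate d t']
      have hlen : (t'.dropWhile (· == d)).length ≤ n := by
        have := List.length_dropWhile_le (· == d) t'
        simp at hcs
        omega
      have := ih (t'.dropWhile (· == d)) hlen d (1 + (t'.takeWhile (· == d)).length)
        (t + pvContrib j) (pvHead_dropWhile d t')
      conv_lhs => rw [hsplit]
      rw [pvScan_run, this]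
      have hR : pvRuns (d :: t') = (d, (t'.takeWhile (· == d)).length + 1)
          :: pvRuns (t'.dropWhile (· == d)) := by rw [pvRuns.eq_def]
      rw [hR]
      simp only [List.map_cons, List.sum_cons]
      push_cast
      ring

theorem pvB_runs (cs : List Char) :
    pvWordB cs = ((pvRuns cs).map (fun p => pvContrib (p.2 : Int))).sum := by
  cases cs with
  | nil => simp [pvWordB, pvRunAdd, pvRuns]
  | cons d t' =>
    rw [pvWordB]
    simp only [List.foldl_cons, pvRunAdd_eq]
    have hstep : pvScanStep (none, 0, 0) d = (some d, 1, 0) := by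
      simp [pvScanStep, pvRunAdd]
    rw [hstep]
    have hsplit : t' = List.replicate (t'.takeWhile (· == d)).length d
        ++ t'.dropWhile (· == d) := by
      conv_lhs => rw [← List.takeWhile_append_dropWhile (p := (· == d)) (l := t')]
      congr 1
      conv_lhs => rw [pvTakeWhile_replicate d t']
    conv_lhs => rw [hsplit]
    rw [pvScan_run]
    have := pvScan_finish (t'.dropWhile (· == d)).length (t'.dropWhile (· == d)) le_rfl d
      (1 + (t'.takeWhile (· == d)).length) 0 (pvHead_dropWhile d t')
    rw [this]
    have hR : pvRuns (d :: t') = (d, (t'.takeWhile (· == d)).length + 1)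
        :: pvRuns (t'.dropWhile (· == d)) := by rw [pvRuns.eq_def]
    rw [hR]
    simp only [List.map_cons, List.sum_cons]
    push_cast
    ring

theorem pvContrib_eq (L : Nat) : pvContrib (L : Int)
    = ((L + 1 - 2 : Nat) : Int) + ((L + 1 - 3 : Nat) : Int)
      + ((L + 1 - 4 : Nat) : Int) + ((L + 1 - 5 : Nat) : Int) := by
  simp [pvContrib]
  omega

theorem pvSums_combine (rs : List (Char × Nat)) :
    (rs.map (fun p => pvContrib (p.2 : Int))).sum
      = (((rs.map (fun p => p.2 + 1 - 2)).sum : Nat) : Int) + (((rs.map (fun p => p.2 + 1 - 3)).sum : Nat) : Int)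
        + (((rs.map (fun p => p.2 + 1 - 4)).sum : Nat) : Int) + (((rs.map (fun p => p.2 + 1 - 5)).sum : Nat) : Int) := by
  induction rs with
  | nil => simp
  | cons p rs ih =>
    simp only [List.map_cons, List.sum_cons, pvContrib_eq p.2]
    push_cast at ih ⊢
    rw [ih]
    ring

theorem pvAstep (w : String) (a b c d : Int) :
    ([2, 3, 4, 5] : List Int).foldl (fun dd k =>
      (PySem.List.pyRange 0 (PySem.Str.len w - k + 1) 1).foldl (fun dd i =>
        let sub := PySem.List.slice w.toList (some i) (some (i + k))
        if pvAllSame sub then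
          dd.insert (PySem.Int.toStr k) (dd.getD (PySem.Int.toStr k) 0 + 1)
        else dd) dd) (PySem.Dict.mk [("2",a),("3",b),("4",c),("5",d)])
    = PySem.Dict.mk [("2", a + (pvW 2 w.toList : Int)), ("3", b + (pvW 3 w.toList : Int)),
        ("4", c + (pvW 4 w.toList : Int)), ("5", d + (pvW 5 w.toList : Int))] := by
  have t2 : PySem.Int.toStr 2 = "2" := by decide
  have t3 : PySem.Int.toStr 3 = "3" := by decide
  have t4 : PySem.Int.toStr 4 = "4" := by decide
  have t5 : PySem.Int.toStr 5 = "5" := by decide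
  have c2 := pvCount_eq w.toList 2
  have c3 := pvCount_eq w.toList 3
  have c4 := pvCount_eq w.toList 4
  have c5 := pvCount_eq w.toList 5
  push_cast at c2 c3 c4 c5
  simp only [List.foldl_cons, List.foldl_nil, t2, t3, t4, t5, PySem.Str.len_eq]
  rw [pvInner2, pvInner3, pvInner4, pvInner5, c2, c3, c4, c5]


theorem pvA_outer (ws : List String) (a b c d : Int) :
    ((ws.foldl (fun dd word =>
      ([2, 3, 4, 5] : List Int).foldl (fun dd k =>
        (PySem.List.pyRange 0 (PySem.Str.len word - k + 1) 1).foldl (fun dd i =>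
          let sub := PySem.List.slice word.toList (some i) (some (i + k))
          if pvAllSame sub then
            dd.insert (PySem.Int.toStr k) (dd.getD (PySem.Int.toStr k) 0 + 1)
          else dd) dd) dd)
      (PySem.Dict.mk [("2",a),("3",b),("4",c),("5",d)])).values.sum)
    = a + b + c + d + (ws.map (fun w => pvWordA w.toList)).sum := by
  induction ws generalizing a b c d with
  | nil =>
    simp [PySem.Dict.values]
    ring
  | cons w t ih =>
    rw [List.foldl_cons, pvAstep, ih]
    simp only [pvWordA, List.map_cons, List.sum_cons]
    ring

theorem pvA_eq (ws : List String) :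
    char_repeat ws = (ws.map (fun w => pvWordA w.toList)).sum := by
  simp only [char_repeat]
  rw [show PySem.Dict.ofList [("2",(0:Int)),("3",0),("4",0),("5",0)]
      = PySem.Dict.mk [("2",0),("3",0),("4",0),("5",0)] from by decide]
  rw [pvA_outer]
  ring

theorem pvB_foldl (ws : List String) (t : Int) :
    ws.foldl (fun total word => total + pvWordB word.toList) t
      = t + (ws.map (fun w => pvWordB w.toList)).sum := by
  induction ws generalizing t with
  | nil => simp
  | cons w l ih =>
    rw [List.foldl_cons, ih]
    simp
    ring

theorem pvWord_eq (cs : List Char) : pvWordA cs = pvWordB cs := by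
  rw [pvWordA, pvB_runs, pvSums_combine,
    pvW_runs 2 (by omega) cs, pvW_runs 3 (by omega) cs,
    pvW_runs 4 (by omega) cs, pvW_runs 5 (by omega) cs]

-- ===== VERDICT (by name: the statement is the Claim_ definition above) =====
theorem char_repeat_spec : Claim_equal_char_repeat := by
  intro ws _
  unfold Spec_char_repeat
  show char_repeat ws = char_repeat_alt ws
  rw [pvA_eq, char_repeat_alt, pvB_foldl]
  simp only [pvWord_eq]
  ring
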